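-- pv_equiv track=rewrite | github.com/littlemisslilycane/Information-Retrieval | Project_Information_Retrieval_System/src/TFIDFRetrievalModel.py | compute_doc_score
-- ===== SOURCE A (Python) =====
-- def compute_doc_score(query_list):
--     doc_score_list = {}
--     for query_term in query_list:
--         for doc_id in query_list[query_term]:
--             if doc_id not in doc_score_list:
--                 doc_tf = 0
--                 for word in query_list:
--                     if doc_id in query_list[word].keys():
--                         doc_tf += query_list[word][doc_id]
--                 doc_score_list[doc_id] = doc_tf
--     return doc_score_list
-- ===== SOURCE B (Python) =====
-- def compute_doc_score(query_list):
--     doc_score_list = {}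
--     for docs in query_list.values():
--         for doc_id, tf in docs.items():
--             doc_score_list[doc_id] = doc_score_list.get(doc_id, 0) + tf
--     return doc_score_list
-- ===== Notes on version B (the rewrite author's own statement) =====
-- stated objective: faster
-- what changed: Instead of, for each newly seen doc, rescanning every query term's posting dict to recompute its total tf, B makes a single pass over all (doc, tf) entries and accumulates each into the score dict as it goes.
import Mathlib
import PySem

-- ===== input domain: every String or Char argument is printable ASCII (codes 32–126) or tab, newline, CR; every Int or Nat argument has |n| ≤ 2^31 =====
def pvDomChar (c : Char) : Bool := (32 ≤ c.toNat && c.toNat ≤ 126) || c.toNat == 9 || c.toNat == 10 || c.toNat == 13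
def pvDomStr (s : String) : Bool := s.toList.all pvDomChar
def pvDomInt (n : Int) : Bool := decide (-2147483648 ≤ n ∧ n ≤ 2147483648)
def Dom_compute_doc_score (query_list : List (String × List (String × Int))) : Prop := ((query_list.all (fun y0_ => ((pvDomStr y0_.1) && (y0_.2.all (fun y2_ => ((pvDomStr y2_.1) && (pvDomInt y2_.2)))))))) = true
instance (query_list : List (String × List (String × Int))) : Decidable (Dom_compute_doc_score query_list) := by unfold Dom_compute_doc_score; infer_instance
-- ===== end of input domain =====

-- B replaces A's per-new-document rescan of every term's posting dict by a single
-- accumulating pass over all (doc, tf) entries (objective: faster, one pass over the entries).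


-- The Python parameter is a dict of dicts; the assoc-list argument is materialised as a
-- PySem.Dict exactly as Python's dict(...) would (both ports share this input conversion).
def pvToDict (query_list : List (String × List (String × Int))) : PySem.Dict String (PySem.Dict String Int) :=
  PySem.Dict.ofList (query_list.map (fun p => (p.1, PySem.Dict.ofList p.2)))

-- ===== PORT A =====
def compute_doc_score (query_list : List (String × List (String × Int))) : List (String × Int) :=
  let q := pvToDict query_list
  (q.keys.foldl (fun doc_score_list query_term =>
      (q.getD query_term PySem.Dict.empty).keys.foldl (fun doc_score_list doc_id =>
        if doc_score_list.contains doc_id then doc_score_list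
        else
          let doc_tf := q.keys.foldl (fun doc_tf word =>
            if (q.getD word PySem.Dict.empty).contains doc_id then
              doc_tf + (q.getD word PySem.Dict.empty).getD doc_id 0
            else doc_tf) 0
          doc_score_list.insert doc_id doc_tf) doc_score_list)
    PySem.Dict.empty).items

-- ===== PORT B =====
def compute_doc_score_alt (query_list : List (String × List (String × Int))) : List (String × Int) :=
  let q := pvToDict query_list
  (q.items.foldl (fun doc_score_list docs =>
      docs.2.items.foldl (fun d e => d.insert e.1 (d.getD e.1 0 + e.2)) doc_score_list)
    PySem.Dict.empty).items

-- ===== PRECONDITION & SPEC =====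
def Spec_compute_doc_score (query_list : List (String × List (String × Int))) (out : List (String × Int)) : Prop := out = compute_doc_score_alt query_list
instance (query_list : List (String × List (String × Int))) (out : List (String × Int)) : Decidable (Spec_compute_doc_score query_list out) := by unfold Spec_compute_doc_score; infer_instance

-- ===== CLAIM (what is proved, stated in full; the proofs are below) =====
def Claim_equal_compute_doc_score : Prop := ∀ (query_list : List (String × List (String × Int))), Dom_compute_doc_score query_list → Spec_compute_doc_score query_list (compute_doc_score query_list)

-- ===== LEMMAS AND PROOFS =====

-- nested loop over a list of lists = one loop over the flattened list
theorem pv_foldl_nested {α β γ : Type} (l : List α) (g : α → List β)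
    (step : γ → β → γ) (init : γ) :
    l.foldl (fun acc a => (g a).foldl step acc) init = (l.flatMap g).foldl step init := by
  induction l generalizing init with
  | nil => rfl
  | cons a l ih => simp [List.flatMap_cons, List.foldl_append, ih]

-- every value of an insert-loop over pairs is an old value or one of the inserted ones
theorem pv_snd_mem_foldl_insert {κ ν : Type} [BEq κ] [LawfulBEq κ]
    (ps : List (κ × ν)) (d : PySem.Dict κ ν) (e : κ × ν)
    (h : e ∈ (ps.foldl (fun d p => d.insert p.1 p.2) d).items) :
    e.2 ∈ d.items.map (·.2) ++ ps.map (·.2) := by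
  induction ps using List.reverseRecOn generalizing e with
  | nil => simpa using List.mem_map_of_mem (f := (·.2)) h
  | append_singleton ps p ih =>
    rw [List.foldl_append, List.foldl_cons, List.foldl_nil] at h
    rcases (PySem.Dict.mem_items_insert _ _ _ _).1 h with h1 | ⟨h1, -⟩
    · simp [h1]
    · have := ih _ h1
      simp only [List.map_append, List.mem_append] at this ⊢
      rcases this with t | t
      · exact Or.inl t
      · exact Or.inr (by simp [t])

theorem pv_inner_nodup (query_list : List (String × List (String × Int)))
    (e : String × PySem.Dict String Int) (h : e ∈ (pvToDict query_list).items) :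
    e.2.keys.Nodup := by
  simp only [pvToDict, PySem.Dict.ofList, PySem.Dict.update] at h
  have h1 := pv_snd_mem_foldl_insert _ _ _ h
  have h2 : e.2 ∈ (query_list.map (fun p => (p.1, PySem.Dict.ofList p.2))).map (·.2) := by
    simpa [PySem.Dict.empty] using h1
  rw [List.map_map] at h2
  obtain ⟨p, -, hp⟩ := List.mem_map.1 h2
  simp only [Function.comp_apply] at hp
  rw [← hp]
  exact PySem.Dict.nodup_keys_ofList _

-- B's accumulator: value at k is the old value plus the sum of entries keyed k
theorem pv_getD_foldl_insert_add (L : List (String × Int))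
    (d : PySem.Dict String Int) (k : String) :
    (L.foldl (fun d e => d.insert e.1 (d.getD e.1 0 + e.2)) d).getD k 0
      = d.getD k 0 + ((L.filter (fun e => e.1 == k)).map (·.2)).sum := by
  induction L generalizing d with
  | nil => simp
  | cons e L ih =>
    simp only [List.foldl_cons, ih, List.filter_cons]
    by_cases h : e.1 = k
    · simp only [h, beq_self_eq_true, if_true, List.map_cons, List.sum_cons,
        PySem.Dict.getD_insert]
      ring
    · have : (e.1 == k) = false := by simpa using h
      simp [this, PySem.Dict.getD_insert, Ne.symm h]

-- A's conditional insert with a state-independent value function is an unconditional insert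
theorem pv_condInsert_eq_insert (D : List String) (S : String → Int)
    (d : PySem.Dict String Int) (hv : ∀ p ∈ d.items, p.2 = S p.1) :
    D.foldl (fun d k => if d.contains k then d else d.insert k (S k)) d
      = D.foldl (fun d k => d.insert k (S k)) d := by
  induction D generalizing d with
  | nil => rfl
  | cons k D ih =>
    simp only [List.foldl_cons]
    have hstep : (if d.contains k then d else d.insert k (S k)) = d.insert k (S k) := by
      by_cases h : d.contains k
      · simp only [h, if_true]
        refine PySem.Dict.ext ?_
        rw [PySem.Dict.items_insert_of_contains _ _ h]
        have hmapeq : ∀ p ∈ d.items,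
            (if (p.1 == k) = true then (k, S k) else p) = (fun p => p) p := by
          intro p hp
          by_cases hk : p.1 = k
          · have := hv p hp
            cases p
            simp_all
          · have : (p.1 == k) = false := by simpa using hk
            simp [this]
        rw [List.map_congr_left hmapeq, List.map_id']
      · simp [h]
    rw [hstep, ih]
    intro p hp
    rcases (PySem.Dict.mem_items_insert _ _ _ _).1 hp with h1 | ⟨h1, -⟩
    · simp [h1]
    · exact hv p h1

theorem pv_getD_foldl_insert_const (D : List String) (S : String → Int)
    (d : PySem.Dict String Int) (k : String) :
    (D.foldl (fun d x => d.insert x (S x)) d).getD k 0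
      = if k ∈ D then S k else d.getD k 0 := by
  induction D generalizing d with
  | nil => simp
  | cons x D ih =>
    simp only [List.foldl_cons, ih, List.mem_cons]
    by_cases h : k ∈ D
    · simp [h]
    · by_cases hx : k = x <;> simp [h, hx, PySem.Dict.getD_insert]

-- in a list of pairs with distinct keys, filtering by a present key yields its one entry
theorem pv_filter_singleton (l : List (String × Int)) (k : String) (v : Int)
    (hmem : (k, v) ∈ l) (hnd : (l.map (·.1)).Nodup) :
    l.filter (fun e => e.1 == k) = [(k, v)] := by
  induction l with
  | nil => simp at hmem
  | cons p l ih =>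
    rw [List.map_cons, List.nodup_cons] at hnd
    rcases List.mem_cons.1 hmem with h1 | h1
    · rw [← h1] at hnd ⊢
      simp only [List.filter_cons, beq_self_eq_true, if_true]
      have hnil : l.filter (fun e => e.1 == k) = [] :=
        List.filter_eq_nil_iff.mpr (fun e he hek => hnd.1 (List.mem_map.mpr
          ⟨e, he, by simpa using hek⟩))
      rw [hnil]
    · have hpk : (p.1 == k) = false := by
        rw [beq_eq_false_iff_ne]
        intro hpk
        exact hnd.1 (List.mem_map.mpr ⟨(k, v), h1, by simp [hpk]⟩)
      rw [List.filter_cons, hpk]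
      simpa using ih h1 hnd.2

-- one posting dict's contribution to A's rescan = the sum of its entries keyed k
theorem pv_contrib (inner : PySem.Dict String Int) (hnd : inner.keys.Nodup)
    (k : String) (s : Int) :
    (if inner.contains k then s + inner.getD k 0 else s)
      = s + ((inner.items.filter (fun e => e.1 == k)).map (·.2)).sum := by
  by_cases h : inner.contains k
  · obtain ⟨v, hv⟩ : ∃ v, inner.get? k = some v := by
      rw [← Option.isSome_iff_exists, ← PySem.Dict.contains_eq_isSome_get?, h]
    have hmem : (k, v) ∈ inner.items := PySem.Dict.mem_items_of_get?_eq_some _ hv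
    rw [pv_filter_singleton _ _ _ hmem hnd]
    simp [h, PySem.Dict.getD_of_get?_eq_some _ _ hv]
  · have hfil : inner.items.filter (fun e => e.1 == k) = [] :=
      List.filter_eq_nil_iff.mpr (fun e he hek => by
        have hk : inner.contains e.1 = true := by
          rw [PySem.Dict.contains_iff_mem_keys]
          exact PySem.Dict.mem_keys_of_mem_items _ he
        rw [show e.1 = k by simpa using hek] at hk
        exact h hk)
    simp [h, hfil]

-- folding A's rescan over a list of posting dicts sums their per-key contributions
theorem pv_sum_contrib (V : List (PySem.Dict String Int)) (k : String)
    (h : ∀ inner ∈ V, inner.keys.Nodup) (init : Int) :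
    V.foldl (fun s inner => if inner.contains k then s + inner.getD k 0 else s) init
      = init + (V.map (fun inner => ((inner.items.filter (fun p => p.1 == k)).map (·.2)).sum)).sum := by
  induction V generalizing init with
  | nil => simp
  | cons inner V ih =>
    simp only [List.foldl_cons, List.map_cons, List.sum_cons,
      pv_contrib inner (h inner (by simp)) k init]
    rw [ih (fun i hi => h i (by simp [hi]))]
    ring

-- the master lemma: on any dict-of-dicts with nodup outer keys and nodup inner keys,
-- A's dict and B's dict coincide
theorem pv_core (q : PySem.Dict String (PySem.Dict String Int))
    (hq : q.keys.Nodup)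
    (hinner : ∀ e ∈ q.items, e.2.keys.Nodup) :
    (q.keys.foldl (fun doc_score_list query_term =>
      (q.getD query_term PySem.Dict.empty).keys.foldl (fun doc_score_list doc_id =>
        if doc_score_list.contains doc_id then doc_score_list
        else
          let doc_tf := q.keys.foldl (fun doc_tf word =>
            if (q.getD word PySem.Dict.empty).contains doc_id then
              doc_tf + (q.getD word PySem.Dict.empty).getD doc_id 0
            else doc_tf) 0
          doc_score_list.insert doc_id doc_tf) doc_score_list)
      PySem.Dict.empty)
    = (q.items.foldl (fun doc_score_list docs =>
        docs.2.items.foldl (fun d e => d.insert e.1 (d.getD e.1 0 + e.2)) doc_score_list)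
      PySem.Dict.empty) := by
  set L : List (String × Int) := q.items.flatMap (fun e => e.2.items) with hL
  set S : String → Int := fun doc_id => q.keys.foldl (fun doc_tf word =>
      if (q.getD word PySem.Dict.empty).contains doc_id then
        doc_tf + (q.getD word PySem.Dict.empty).getD doc_id 0
      else doc_tf) 0 with hS
  have hkv : q.keys.map (fun t => q.getD t PySem.Dict.empty) = q.items.map (·.2) := by
    rw [← PySem.Dict.values_eq_map_keys q hq PySem.Dict.empty]
    rfl
  -- A's nested loop is a flat conditional-insert loop over L.map (·.1)
  have hA : (q.keys.foldl (fun dsl query_term =>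
      (q.getD query_term PySem.Dict.empty).keys.foldl (fun dsl doc_id =>
        if dsl.contains doc_id then dsl else dsl.insert doc_id (S doc_id)) dsl)
      PySem.Dict.empty)
      = (L.map (·.1)).foldl
          (fun d k => if d.contains k then d else d.insert k (S k)) PySem.Dict.empty := by
    rw [pv_foldl_nested]
    congr 1
    calc q.keys.flatMap (fun t => (q.getD t PySem.Dict.empty).keys)
        = (q.keys.map (fun t => q.getD t PySem.Dict.empty)).flatMap PySem.Dict.keys := by
          rw [List.flatMap_map]
      _ = (q.items.map (·.2)).flatMap PySem.Dict.keys := by rw [hkv]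
      _ = q.items.flatMap (fun e => e.2.items.map (·.1)) := by rw [List.flatMap_map]; rfl
      _ = L.map (·.1) := by rw [hL, List.map_flatMap]
  -- B's nested loop is a flat accumulate loop over L
  have hB : (q.items.foldl (fun dsl docs =>
        docs.2.items.foldl (fun d e => d.insert e.1 (d.getD e.1 0 + e.2)) dsl)
      PySem.Dict.empty)
      = L.foldl (fun d e => d.insert e.1 (d.getD e.1 0 + e.2)) PySem.Dict.empty := by
    rw [pv_foldl_nested]
  have hv0 : ∀ p ∈ (PySem.Dict.empty : PySem.Dict String Int).items, p.2 = S p.1 := by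
    intro p hp
    simp [PySem.Dict.empty] at hp
  refine hA.trans (((pv_condInsert_eq_insert (L.map (·.1)) S PySem.Dict.empty hv0).trans
    ?_).trans hB.symm)
  -- both sides now have nodup keys and the same keys; compare via items_eq_map_keys
  have hndA : ((L.map (·.1)).foldl (fun d x => d.insert x (S x)) PySem.Dict.empty).keys.Nodup :=
    PySem.Dict.nodup_keys_foldl_insert (L.map (·.1)) (fun _ x => S x) PySem.Dict.empty
      PySem.Dict.nodup_keys_empty
  have hndB : (L.foldl (fun d e => d.insert e.1 (d.getD e.1 0 + e.2)) PySem.Dict.empty).keys.Nodup :=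
    PySem.Dict.nodup_keys_foldl_insert_key L (·.1) (fun d e => d.getD e.1 0 + e.2)
      PySem.Dict.empty PySem.Dict.nodup_keys_empty
  apply PySem.Dict.ext
  rw [PySem.Dict.items_eq_map_keys _ hndA 0, PySem.Dict.items_eq_map_keys _ hndB 0]
  rw [PySem.Dict.keys_foldl_insert, PySem.Dict.keys_foldl_insert_key, PySem.Dict.keys_empty]
  apply List.map_congr_left
  intro k hk
  have hkD : k ∈ L.map (·.1) := by
    rw [PySem.Set.update_nil_left] at hk
    exact (PySem.Set.mem_ofList _ _).1 hk
  rw [pv_getD_foldl_insert_const, if_pos hkD, pv_getD_foldl_insert_add,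
    PySem.Dict.getD_empty, zero_add]
  -- S k = the sum over all entries of L keyed k
  have hSk : S k = (q.items.map (fun e => ((e.2.items.filter (fun p => p.1 == k)).map (·.2)).sum)).sum := by
    simp only [hS]
    rw [← List.foldl_map (f := fun t => q.getD t PySem.Dict.empty)
      (g := fun s inner => if inner.contains k then s + inner.getD k 0 else s)
      (l := q.keys) (init := 0), hkv]
    rw [pv_sum_contrib _ k (fun inner hm => by
        obtain ⟨e, he, hee⟩ := List.mem_map.1 hm
        rw [← hee]
        exact hinner e he), zero_add]
    rw [List.map_map]
    rfl
  rw [hSk, hL, List.filter_flatMap, List.map_flatMap]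
  congr 1
  have : ∀ (l : List (String × PySem.Dict String Int)),
      ((l.flatMap (fun e => (e.2.items.filter (fun p => p.1 == k)).map (·.2))).sum : Int)
        = (l.map (fun e => ((e.2.items.filter (fun p => p.1 == k)).map (·.2)).sum)).sum := by
    intro l
    induction l with
    | nil => simp
    | cons e l ih => simp [List.flatMap_cons, ih]
  rw [this]

theorem pv_main (query_list : List (String × List (String × Int))) :
    compute_doc_score query_list = compute_doc_score_alt query_list :=
  congrArg PySem.Dict.items (pv_core (pvToDict query_list)
    (PySem.Dict.nodup_keys_ofList _) (pv_inner_nodup query_list))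

-- ===== VERDICT (by name: the statement is the Claim_ definition above) =====
theorem compute_doc_score_spec : Claim_equal_compute_doc_score := by
  intro query_list _
  unfold Spec_compute_doc_score
  exact pv_main query_list
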